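-- pv_equiv track=rewrite | github.com/jjjimmijjj/character_animator- | jsonextract.py | separate_chat_data
-- ===== SOURCE A (Python) =====
-- def separate_chat_data(json_data):
--     friendly_interactions = []
--     romantic_fantasy_roleplay = []
--     inappropriate_offensive_content = []
--     miscellaneous_responses = []
--
--     data_list = json_data.get("data", [])
--
--     for item in data_list:
--         message, response = item
--         if message and response:
--             # Separate data into different categories based on keywords in the message
--             if any(keyword in message.lower() for keyword in ["hello", "hey", "hi"]):
--                 friendly_interactions.append(item)
--             elif any(keyword in message.lower() for keyword in ["character sheet", "help"]):
--                 romantic_fantasy_roleplay.append(item)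
--             elif any(keyword in message.lower() for keyword in ["lousy", "insolence", "spank"]):
--                 inappropriate_offensive_content.append(item)
--             else:
--                 miscellaneous_responses.append(item)
--
--     return {
--         "Friendly Interaction and Confusion": friendly_interactions,
--         "Romantic and Fantasy Roleplay": romantic_fantasy_roleplay,
--         "Inappropriate and Offensive Content": inappropriate_offensive_content,
--         "Random and Miscellaneous Responses": miscellaneous_responses
--     }
-- ===== SOURCE B (Python) =====
-- KEYWORD_TABLE = [
--     ["hello", "hey", "hi"],
--     ["character sheet", "help"],
--     ["lousy", "insolence", "spank"],
-- ]
--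
-- NAMES = [
--     "Friendly Interaction and Confusion",
--     "Romantic and Fantasy Roleplay",
--     "Inappropriate and Offensive Content",
--     "Random and Miscellaneous Responses",
-- ]
--
--
-- def _category(message):
--     msg = message.lower()
--     for i, kws in enumerate(KEYWORD_TABLE):
--         if any(kw in msg for kw in kws):
--             return i
--     return 3
--
--
-- def separate_chat_data(json_data):
--     data = [it for it in json_data.get("data", []) if it[0] and it[1]]
--     return {name: [it for it in data if _category(it[0]) == i]
--             for i, name in enumerate(NAMES)}
-- ===== Notes on version B (the rewrite author's own statement) =====
-- stated objective: simpler
-- what changed: Replaces the single pass with four append-accumulators and an if/elif chain by a keyword table with a first-match category function plus one filter comprehension per bucket.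
import Mathlib
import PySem

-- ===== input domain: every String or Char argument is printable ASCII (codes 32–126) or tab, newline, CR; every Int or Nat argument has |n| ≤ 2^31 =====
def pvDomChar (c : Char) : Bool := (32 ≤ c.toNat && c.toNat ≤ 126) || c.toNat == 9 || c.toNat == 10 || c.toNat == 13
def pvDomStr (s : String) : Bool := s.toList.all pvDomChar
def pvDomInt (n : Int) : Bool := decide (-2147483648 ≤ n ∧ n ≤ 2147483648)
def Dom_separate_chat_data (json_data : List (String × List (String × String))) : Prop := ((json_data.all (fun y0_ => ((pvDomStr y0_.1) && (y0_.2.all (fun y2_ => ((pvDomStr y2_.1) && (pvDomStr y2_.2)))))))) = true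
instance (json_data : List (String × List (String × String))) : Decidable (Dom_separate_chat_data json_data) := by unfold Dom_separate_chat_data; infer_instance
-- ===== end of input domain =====

-- B replaces A's single pass with four append-accumulators and an if/elif chain by a
-- first-match keyword-table category function plus one filter per bucket (objective: simpler).


-- ===== PORT A =====
-- literal transliteration: one pass over data_list, four append-accumulators, if/elif chain
def separate_chat_data (json_data : List (String × List (String × String))) : List (String × List (String × String)) :=
  let data_list := (PySem.Dict.mk json_data).getD "data" []
  let st := data_list.foldl (fun (st : List (String × String) × List (String × String) × List (String × String) × List (String × String)) item =>
      let (fri, rom, ina, mis) := st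
      let (message, response) := item
      if message ≠ "" ∧ response ≠ "" then
        if (["hello", "hey", "hi"].any fun keyword => PySem.Str.isIn keyword (PySem.Str.lower message)) then
          (fri ++ [item], rom, ina, mis)
        else if (["character sheet", "help"].any fun keyword => PySem.Str.isIn keyword (PySem.Str.lower message)) then
          (fri, rom ++ [item], ina, mis)
        else if (["lousy", "insolence", "spank"].any fun keyword => PySem.Str.isIn keyword (PySem.Str.lower message)) then
          (fri, rom, ina ++ [item], mis)
        else
          (fri, rom, ina, mis ++ [item])
      else (fri, rom, ina, mis)) ([], [], [], [])
  [("Friendly Interaction and Confusion", st.1),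
   ("Romantic and Fantasy Roleplay", st.2.1),
   ("Inappropriate and Offensive Content", st.2.2.1),
   ("Random and Miscellaneous Responses", st.2.2.2)]

-- ===== PORT B =====
def pvKeywordTable : List (List String) :=
  [["hello", "hey", "hi"], ["character sheet", "help"], ["lousy", "insolence", "spank"]]

def pvNames : List String :=
  ["Friendly Interaction and Confusion", "Romantic and Fantasy Roleplay",
   "Inappropriate and Offensive Content", "Random and Miscellaneous Responses"]

-- first index of the keyword table whose any-keyword test fires; 3 if none
def pvCategory (message : String) : Int :=
  let msg := PySem.Str.lower message
  match (PySem.List.enumerate pvKeywordTable).find? (fun p => p.2.any fun kw => PySem.Str.isIn kw msg) with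
  | some p => p.1
  | none => 3

def separate_chat_data_alt (json_data : List (String × List (String × String))) : List (String × List (String × String)) :=
  let data := ((PySem.Dict.mk json_data).getD "data" []).filter (fun it => it.1 ≠ "" && it.2 ≠ "")
  (PySem.List.enumerate pvNames).map (fun p => (p.2, data.filter (fun it => pvCategory it.1 == p.1)))

-- ===== PRECONDITION & SPEC =====
def Spec_separate_chat_data (json_data : List (String × List (String × String))) (out : List (String × List (String × String))) : Prop := out = separate_chat_data_alt json_data
instance (json_data : List (String × List (String × String))) (out : List (String × List (String × String))) : Decidable (Spec_separate_chat_data json_data out) := by unfold Spec_separate_chat_data; infer_instance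

-- ===== CLAIM (what is proved, stated in full; the proofs are below) =====
def Claim_equal_separate_chat_data : Prop := ∀ (json_data : List (String × List (String × String))), Dom_separate_chat_data json_data → Spec_separate_chat_data json_data (separate_chat_data json_data)

-- ===== LEMMAS AND PROOFS =====

-- pvCategory as the if/elif chain A uses
theorem pvCategory_eq (m : String) :
    pvCategory m =
      (if (["hello", "hey", "hi"].any fun kw => PySem.Str.isIn kw (PySem.Str.lower m)) then 0
       else if (["character sheet", "help"].any fun kw => PySem.Str.isIn kw (PySem.Str.lower m)) then 1
       else if (["lousy", "insolence", "spank"].any fun kw => PySem.Str.isIn kw (PySem.Str.lower m)) then 2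
       else 3) := by
  simp only [pvCategory, pvKeywordTable, PySem.List.enumerate_cons, PySem.List.enumerate_nil,
    List.find?]
  split_ifs with h1 h2 h3
  · rw [h1]
  · rw [Bool.not_eq_true] at h1
    rw [h1, h2]
    norm_num
  · rw [Bool.not_eq_true] at h1 h2
    rw [h1, h2, h3]
    norm_num
  · rw [Bool.not_eq_true] at h1 h2 h3
    rw [h1, h2, h3]

-- loop invariant: A's fold extends each accumulator by the corresponding filter of the rest
theorem foldA_inv (data : List (String × String))
    (fri rom ina mis : List (String × String)) :
    data.foldl (fun (st : List (String × String) × List (String × String) × List (String × String) × List (String × String)) item =>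
      let (fri, rom, ina, mis) := st
      let (message, response) := item
      if message ≠ "" ∧ response ≠ "" then
        if (["hello", "hey", "hi"].any fun keyword => PySem.Str.isIn keyword (PySem.Str.lower message)) then
          (fri ++ [item], rom, ina, mis)
        else if (["character sheet", "help"].any fun keyword => PySem.Str.isIn keyword (PySem.Str.lower message)) then
          (fri, rom ++ [item], ina, mis)
        else if (["lousy", "insolence", "spank"].any fun keyword => PySem.Str.isIn keyword (PySem.Str.lower message)) then
          (fri, rom, ina ++ [item], mis)
        else
          (fri, rom, ina, mis ++ [item])
      else (fri, rom, ina, mis)) (fri, rom, ina, mis) =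
    (fri ++ (data.filter (fun it => it.1 ≠ "" && it.2 ≠ "")).filter (fun it => pvCategory it.1 == 0),
     rom ++ (data.filter (fun it => it.1 ≠ "" && it.2 ≠ "")).filter (fun it => pvCategory it.1 == 1),
     ina ++ (data.filter (fun it => it.1 ≠ "" && it.2 ≠ "")).filter (fun it => pvCategory it.1 == 2),
     mis ++ (data.filter (fun it => it.1 ≠ "" && it.2 ≠ "")).filter (fun it => pvCategory it.1 == 3)) := by
  induction data generalizing fri rom ina mis with
  | nil => simp
  | cons hd tl ih =>
    obtain ⟨message, response⟩ := hd
    by_cases hk : message ≠ "" ∧ response ≠ ""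
    · have hb : (decide (message ≠ "") && decide (response ≠ "")) = true := by
        simp [hk.1, hk.2]
      simp only [List.foldl_cons, if_pos hk]
      split_ifs with h1 h2 h3
      · have hc : pvCategory message = 0 := by rw [pvCategory_eq, if_pos h1]
        rw [ih]; simp [hk, hc, List.filter_filter, Bool.and_comm, List.append_assoc]
      · have hc : pvCategory message = 1 := by rw [pvCategory_eq, if_neg h1, if_pos h2]
        rw [ih]; simp [hk, hc, List.filter_filter, Bool.and_comm, List.append_assoc]
      · have hc : pvCategory message = 2 := by rw [pvCategory_eq, if_neg h1, if_neg h2, if_pos h3]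
        rw [ih]; simp [hk, hc, List.filter_filter, Bool.and_comm, List.append_assoc]
      · have hc : pvCategory message = 3 := by rw [pvCategory_eq, if_neg h1, if_neg h2, if_neg h3]
        rw [ih]; simp [hk, hc, List.filter_filter, Bool.and_comm, List.append_assoc]
    · have hb : (decide (message ≠ "") && decide (response ≠ "")) = false := by
        simp only [Bool.and_eq_false_iff, decide_eq_false_iff_not]; tauto
      simp only [List.foldl_cons, List.filter_cons, hb, if_neg hk, Bool.false_eq_true,
        if_false]
      exact ih fri rom ina mis

-- ===== VERDICT (by name: the statement is the Claim_ definition above) =====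
theorem separate_chat_data_spec : Claim_equal_separate_chat_data := by
  intro json_data _
  show _ = _
  simp only [separate_chat_data, separate_chat_data_alt, foldA_inv, List.nil_append]
  simp [pvNames, PySem.List.enumerate_cons, PySem.List.enumerate_nil]
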